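-- pv_equiv track=rewrite | github.com/abdelazizSalah/RegExp_NFA_DFA_DFAMinimization | validation_class.py | validate_no_neasted_square_brackets
-- ===== SOURCE A (Python) =====
-- from collections import deque
--
-- def validate_no_neasted_square_brackets(expression:str) -> bool:
--     '''
--     This function validates the square brackets in the expression.
--     It returns True if the square brackets are valid, otherwise it returns False.
--     The square brackets are valid in the following case:
--         1. no nested square brackets.
--
--     Input:
--         expression: str
--     Output:
--         bool
--     '''
--     stack = deque()
--     for char in expression:
--         if char == '[':
--             if len(stack) != 0: # this mean that there is a nested square bracket.
--                 return False
--             stack.append(char)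
--         elif char == ']':
--             if len(stack) == 0 or stack.pop() != '[':
--                 return False
--     return len(stack) == 0
-- ===== SOURCE B (Python) =====
-- def validate_no_neasted_square_brackets(expression: str) -> bool:
--     '''Extract the bracket subsequence, then check it is exactly a flat
--     sequence of "[]" pairs (no nesting, nothing unmatched).'''
--     brackets = ''.join(c for c in expression if c in '[]')
--     return brackets == '[]' * (len(brackets) // 2)
-- ===== Notes on version B (the rewrite author's own statement) =====
-- stated objective: idiomatic
-- what changed: Replaces the per-character deque push/pop stack simulation by an extract-then-pattern-check decomposition: filter out the bracket characters and compare the result with the flat open-close pair pattern repeated half-its-length times.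
import Mathlib
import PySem

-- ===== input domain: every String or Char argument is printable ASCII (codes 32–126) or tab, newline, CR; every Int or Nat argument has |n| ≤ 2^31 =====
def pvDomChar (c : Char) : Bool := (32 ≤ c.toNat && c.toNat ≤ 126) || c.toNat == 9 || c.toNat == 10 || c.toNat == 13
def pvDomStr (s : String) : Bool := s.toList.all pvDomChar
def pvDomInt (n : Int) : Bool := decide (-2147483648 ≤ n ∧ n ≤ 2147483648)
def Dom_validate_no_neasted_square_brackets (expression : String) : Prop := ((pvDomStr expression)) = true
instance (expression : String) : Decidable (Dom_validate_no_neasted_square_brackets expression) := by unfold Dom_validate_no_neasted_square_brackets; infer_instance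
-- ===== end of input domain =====

-- B replaces A's per-character deque push/pop stack simulation by an
-- extract-then-pattern-check decomposition (filter the brackets, compare with
-- the flat pattern "[]" * (len // 2)); objective: idiomatic, same O(n) cost.

-- ===== PORT A =====
-- the loop over the characters, carrying the deque (list used as a stack)
def pvGoA : List Char → List Char → Bool
  | [], stack => stack.length == 0
  | c :: rest, stack =>
    if c == '[' then
      if stack.length != 0 then false
      else pvGoA rest (stack ++ [c])
    else if c == ']' then
      if stack.length == 0 then false
      else
        match PySem.List.pop? stack (-1) with
        | none => false
        | some (v, stack') => if v != '[' then false else pvGoA rest stack'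
    else pvGoA rest stack

def validate_no_neasted_square_brackets (expression : String) : Bool :=
  pvGoA expression.toList []

-- ===== PORT B =====
def validate_no_neasted_square_brackets_alt (expression : String) : Bool :=
  let brackets := expression.toList.filter (fun c => c == '[' || c == ']')
  brackets == (List.replicate (brackets.length / 2) ['[', ']']).flatten

-- ===== PRECONDITION & SPEC =====
def Spec_validate_no_neasted_square_brackets (expression : String) (out : Bool) : Prop := out = validate_no_neasted_square_brackets_alt expression
instance (expression : String) (out : Bool) : Decidable (Spec_validate_no_neasted_square_brackets expression out) := by unfold Spec_validate_no_neasted_square_brackets; infer_instance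

-- ===== CLAIM (what is proved, stated in full; the proofs are below) =====
def Claim_equal_validate_no_neasted_square_brackets : Prop := ∀ (expression : String), Dom_validate_no_neasted_square_brackets expression → Spec_validate_no_neasted_square_brackets expression (validate_no_neasted_square_brackets expression)

-- ===== LEMMAS AND PROOFS =====

-- "bs is an alternation of '[' ']' pairs": the language B's pattern describes
def pvPairs : List Char → Bool
  | [] => true
  | [_] => false
  | c1 :: c2 :: r => c1 == '[' && c2 == ']' && pvPairs r

theorem pvGoA_filter (l : List Char) :
    pvGoA l [] = pvPairs (l.filter (fun c => c == '[' || c == ']')) ∧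
    pvGoA l ['['] = pvPairs ('[' :: l.filter (fun c => c == '[' || c == ']')) := by
  induction l with
  | nil => constructor <;> simp [pvGoA, pvPairs]
  | cons c rest ih =>
    by_cases h1 : c = '['
    · subst h1
      refine ⟨?_, ?_⟩
      · simpa [pvGoA, List.filter_cons] using ih.2
      · simp [pvGoA, pvPairs]
    · by_cases h2 : c = ']'
      · subst h2
        refine ⟨?_, ?_⟩
        · simp [pvGoA]
          cases rest.filter (fun c => c == '[' || c == ']') with
          | nil => simp [pvPairs]
          | cons x xs => simp [pvPairs]
        · simpa [pvGoA, List.filter_cons, PySem.List.pop?, pvPairs] using ih.1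
      · have hc : (c == '[' || c == ']') = false := by simp [h1, h2]
        refine ⟨?_, ?_⟩
        · simpa [pvGoA, h1, h2, List.filter_cons, hc] using ih.1
        · simpa [pvGoA, h1, h2, List.filter_cons, hc] using ih.2

theorem pvPairs_eq_pattern (bs : List Char) :
    pvPairs bs = (bs == (List.replicate (bs.length / 2) ['[', ']']).flatten) := by
  induction bs using pvPairs.induct with
  | case1 => simp [pvPairs]
  | case2 c => simp [pvPairs]
  | case3 c1 c2 r ih =>
    have h2 : (r.length + 1 + 1) / 2 = r.length / 2 + 1 := by omega
    simp [pvPairs, h2, List.replicate_succ, ih, Bool.and_assoc]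

-- ===== VERDICT (by name: the statement is the Claim_ definition above) =====
theorem validate_no_neasted_square_brackets_spec : Claim_equal_validate_no_neasted_square_brackets := by
  intro expression _
  unfold Spec_validate_no_neasted_square_brackets validate_no_neasted_square_brackets validate_no_neasted_square_brackets_alt
  rw [(pvGoA_filter expression.toList).1, pvPairs_eq_pattern]
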